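-- pv_equiv track=rewrite | github.com/speed1313/input-method | src/input_method/train-ngram.py | train_ngram_model
-- ===== SOURCE A (Python) =====
-- from collections import Counter, defaultdict
--
-- def train_ngram_model(input_tokenized_text, output_tokenized_text, n=2):
--     ngram_dict = defaultdict(Counter)
--     # ngram_dict = {"tw": {"two": 1}, "wo": {"words": 1}}
--     for i in range(n):
--         for j in range(i, len(input_tokenized_text)):
--             prefix = input_tokenized_text[j - i : j + 1]
--             suffix = output_tokenized_text[j]
--             prefix = tuple(prefix)
--             ngram_dict[prefix][suffix] += 1
--     return ngram_dict
-- ===== SOURCE B (Python) =====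
-- def train_ngram_model(input_tokenized_text, output_tokenized_text, n=2):
--     # One pass over positions: at each position j build the contexts ending at j
--     # incrementally (prepend one token per length) and count them into one
--     # bucket per context length; the model is the buckets merged in length order.
--     L = len(input_tokenized_text)
--     m = min(n, L) if n > 0 else 0
--     buckets = [{} for _ in range(m)]  # buckets[i] counts (i+1)-token contexts
--     for j, suffix in enumerate(output_tokenized_text[:L]):
--         prefix = ()
--         for i in range(min(m, j + 1)):
--             prefix = (input_tokenized_text[j - i],) + prefix
--             counter = buckets[i].setdefault(prefix, {})
--             counter[suffix] = counter.get(suffix, 0) + 1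
--     model = {}
--     for bucket in buckets:
--         model.update(bucket)
--     return model
-- ===== Notes on version B (the rewrite author's own statement) =====
-- stated objective: alternative
-- what changed: B makes a single pass over the positions, building all context lengths at each position incrementally (one tuple prepend per length) into one plain-dict bucket per context length, and merges the buckets in length order at the end, instead of A's one full re-slicing pass per context length into a defaultdict(Counter).
import Mathlib
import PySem

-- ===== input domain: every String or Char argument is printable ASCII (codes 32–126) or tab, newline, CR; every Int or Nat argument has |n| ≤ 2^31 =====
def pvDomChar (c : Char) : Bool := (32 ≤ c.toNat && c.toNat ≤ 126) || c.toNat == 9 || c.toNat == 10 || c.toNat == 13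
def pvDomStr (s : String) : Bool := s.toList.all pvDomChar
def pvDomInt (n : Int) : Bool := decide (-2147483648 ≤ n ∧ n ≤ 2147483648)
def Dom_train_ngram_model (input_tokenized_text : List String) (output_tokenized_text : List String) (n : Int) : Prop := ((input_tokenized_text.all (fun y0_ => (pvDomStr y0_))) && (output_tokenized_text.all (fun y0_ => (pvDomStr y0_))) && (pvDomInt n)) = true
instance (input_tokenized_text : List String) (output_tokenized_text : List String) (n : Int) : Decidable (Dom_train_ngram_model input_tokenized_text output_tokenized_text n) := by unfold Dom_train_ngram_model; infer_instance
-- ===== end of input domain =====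

-- B replaces A's one-pass-per-context-length scheme by a single pass over the positions that
-- grows all context lengths incrementally into per-length buckets merged at the end
-- (objective: alternative, same counts in the same order).

-- ===== PORT A =====
-- ngram_dict[prefix][suffix] += 1 on a defaultdict(Counter) is Dict.modify at both levels;
-- output_tokenized_text[j] raises IndexError where pyGet? is none (excluded by Pre_).
def train_ngram_model (input_tokenized_text : List String) (output_tokenized_text : List String) (n : Int) : List (List String × List (String × Int)) :=
  ((PySem.List.pyRange 0 n 1).foldl (fun d i =>
    (PySem.List.pyRange i (input_tokenized_text.length : Int) 1).foldl (fun d j =>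
      let pref := PySem.List.slice input_tokenized_text (some (j - i)) (some (j + 1))
      let suff := (PySem.List.pyGet? output_tokenized_text j).getD ""
      d.modify pref PySem.Dict.empty (fun c => c.modify suff 0 (· + 1))) d)
    PySem.Dict.empty).items.map (fun p => (p.1, p.2.items))

-- ===== PORT B =====
-- buckets[i] is read with pyGet? and, since Python mutates the dict object stored in slot i,
-- written back with List.set at i.toNat — exact because every i used satisfies 0 ≤ i < len(buckets).
def train_ngram_model_alt (input_tokenized_text : List String) (output_tokenized_text : List String) (n : Int) : List (List String × List (String × Int)) :=
  let L : Int := (input_tokenized_text.length : Int)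
  let m : Int := if 0 < n then min n L else 0
  let buckets0 : List (PySem.Dict (List String) (PySem.Dict String Int)) :=
    (PySem.List.pyRange 0 m 1).map (fun _ => PySem.Dict.empty)
  let buckets := (PySem.List.enumerate (PySem.List.slice output_tokenized_text none (some L))).foldl
    (fun bs js =>
      ((PySem.List.pyRange 0 (min m (js.1 + 1)) 1).foldl (fun st i =>
          let pref := ((PySem.List.pyGet? input_tokenized_text (js.1 - i)).getD "") :: st.2
          let b := (PySem.List.pyGet? st.1 i).getD PySem.Dict.empty
          let b1 := b.setdefault pref PySem.Dict.empty
          let c := b1.getD pref PySem.Dict.empty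
          (st.1.set i.toNat (b1.insert pref (c.insert js.2 (c.getD js.2 0 + 1))), pref))
        (bs, ([] : List String))).1)
    buckets0
  (buckets.foldl (fun model b => model.update b.items) PySem.Dict.empty).items.map
    (fun p => (p.1, p.2.items))

-- ===== PRECONDITION & SPEC =====
-- Pre_ excludes exactly the inputs where A raises IndexError (n ≥ 1 and the output list
-- shorter than the input list); everywhere else A returns normally.
def Pre_train_ngram_model (input_tokenized_text : List String) (output_tokenized_text : List String) (n : Int) : Prop :=
  n ≤ 0 ∨ input_tokenized_text.length ≤ output_tokenized_text.length
instance (input_tokenized_text : List String) (output_tokenized_text : List String) (n : Int) : Decidable (Pre_train_ngram_model input_tokenized_text output_tokenized_text n) := by unfold Pre_train_ngram_model; infer_instance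

def pvWitness_train_ngram_model : List String × List String × Int := (["a", "b", "a"], ["x", "y", "x"], 2)

def Spec_train_ngram_model (input_tokenized_text : List String) (output_tokenized_text : List String) (n : Int) (out : List (List String × List (String × Int))) : Prop := out = train_ngram_model_alt input_tokenized_text output_tokenized_text n
instance (input_tokenized_text : List String) (output_tokenized_text : List String) (n : Int) (out : List (List String × List (String × Int))) : Decidable (Spec_train_ngram_model input_tokenized_text output_tokenized_text n out) := by unfold Spec_train_ngram_model; infer_instance

-- ===== CLAIM (what is proved, stated in full; the proofs are below) =====
def Claim_equal_train_ngram_model : Prop := ∀ (input_tokenized_text : List String) (output_tokenized_text : List String) (n : Int), Dom_train_ngram_model input_tokenized_text output_tokenized_text n → Pre_train_ngram_model input_tokenized_text output_tokenized_text n → Spec_train_ngram_model input_tokenized_text output_tokenized_text n (train_ngram_model input_tokenized_text output_tokenized_text n)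

-- ===== LEMMAS AND PROOFS =====

-- the one counting step both programs perform per (prefix, suffix) event
def pvStep (d : PySem.Dict (List String) (PySem.Dict String Int)) (e : List String × String) :
    PySem.Dict (List String) (PySem.Dict String Int) :=
  d.modify e.1 PySem.Dict.empty (fun c => c.modify e.2 0 (· + 1))

-- B's setdefault/get/insert step is the same dict transformation as A's nested modify
lemma pvStepB_eq (b : PySem.Dict (List String) (PySem.Dict String Int)) (p : List String) (s : String) :
    (b.setdefault p PySem.Dict.empty).insert p
      (((b.setdefault p PySem.Dict.empty).getD p PySem.Dict.empty).insert s
        (((b.setdefault p PySem.Dict.empty).getD p PySem.Dict.empty).getD s 0 + 1)) =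
      pvStep b (p, s) := by
  have hmod : pvStep b (p, s) =
      b.insert p (((b.getD p PySem.Dict.empty)).insert s
        ((b.getD p PySem.Dict.empty).getD s 0 + 1)) := rfl
  by_cases hc : b.contains p = true
  · rw [PySem.Dict.setdefault_of_contains b PySem.Dict.empty hc, hmod]
  · have hcf : b.contains p = false := by simpa using hc
    rw [PySem.Dict.setdefault_of_not_contains b PySem.Dict.empty hcf,
      PySem.Dict.getD_insert_self, PySem.Dict.insert_insert_self, hmod]
    rw [PySem.Dict.getD_of_not_contains b PySem.Dict.empty hcf]

-- the order-i events up to position J, in position order: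
-- (window of i+1 tokens ending at j, output token at j)
def pvEv (inp out : List String) (i : Nat) (J : Nat) : List (List String × String) :=
  (List.range' i (J - i)).map (fun j => ((inp.drop (j - i)).take (i + 1), out.getD j ""))

-- every key of the order-i events is a window of exactly i+1 tokens
lemma pvEv_key_length (inp out : List String) (i J : Nat) (hJ : J ≤ inp.length)
    (p : List String) (hp : p ∈ (pvEv inp out i J).map Prod.fst) : p.length = i + 1 := by
  simp only [pvEv, List.map_map, List.mem_map, Function.comp_apply] at hp
  obtain ⟨j, hj, rfl⟩ := hp
  have hj' := List.mem_range'_1.mp hj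
  simp only [List.length_take, List.length_drop]
  omega

-- lookup in a dict whose items start with entries whose keys all differ from k
lemma pvGet?_append (base r : List (List String × PySem.Dict String Int)) (k : List String)
    (h : ∀ q ∈ base, q.1 ≠ k) :
    (PySem.Dict.mk (base ++ r) : PySem.Dict (List String) (PySem.Dict String Int)).get? k =
      (PySem.Dict.mk r : PySem.Dict (List String) (PySem.Dict String Int)).get? k := by
  show ((base ++ r).find? (fun p => p.1 == k)).map Prod.snd =
    (r.find? (fun p => p.1 == k)).map Prod.snd
  rw [List.find?_append, List.find?_eq_none.mpr (by intro q hq; simpa using h q hq)]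
  rfl

-- one counting step on a dict split as fresh 'base' entries followed by 't' acts inside 't'
lemma pvStep_split (base : List (List String × PySem.Dict String Int))
    (t : PySem.Dict (List String) (PySem.Dict String Int)) (e : List String × String)
    (h : ∀ q ∈ base, q.1 ≠ e.1) :
    pvStep (PySem.Dict.mk (base ++ t.items)) e = PySem.Dict.mk (base ++ (pvStep t e).items) := by
  have hget : (PySem.Dict.mk (base ++ t.items) :
      PySem.Dict (List String) (PySem.Dict String Int)).getD e.1 PySem.Dict.empty =
      t.getD e.1 PySem.Dict.empty := by
    show ((PySem.Dict.mk (base ++ t.items) :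
      PySem.Dict (List String) (PySem.Dict String Int)).get? e.1).getD _ = (t.get? e.1).getD _
    rw [pvGet?_append base t.items e.1 h]
  have hcont : (PySem.Dict.mk (base ++ t.items) :
      PySem.Dict (List String) (PySem.Dict String Int)).contains e.1 = t.contains e.1 := by
    show (base ++ t.items).any (fun p => p.1 == e.1) = t.items.any (fun p => p.1 == e.1)
    rw [List.any_append]
    have : base.any (fun p => p.1 == e.1) = false := by
      simp only [List.any_eq_false]
      intro q hq; simpa using h q hq
    rw [this, Bool.false_or]
  apply PySem.Dict.ext
  simp only [pvStep, PySem.Dict.modify, hget]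
  by_cases hct : t.contains e.1 = true
  · have hcc : (PySem.Dict.mk (base ++ t.items) :
        PySem.Dict (List String) (PySem.Dict String Int)).contains e.1 = true := by
      rw [hcont]; exact hct
    rw [PySem.Dict.items_insert_of_contains _ _ hcc, PySem.Dict.items_insert_of_contains _ _ hct]
    show (base ++ t.items).map _ = base ++ t.items.map _
    rw [List.map_append]
    congr 1
    conv_rhs => rw [← List.map_id base]
    apply List.map_congr_left
    intro q hq
    have := h q hq
    simp [this]
  · have hcc : (PySem.Dict.mk (base ++ t.items) :
        PySem.Dict (List String) (PySem.Dict String Int)).contains e.1 = false := by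
      rw [hcont]; simpa using hct
    rw [PySem.Dict.items_insert_of_not_contains _ _ hcc,
      PySem.Dict.items_insert_of_not_contains _ _ (by simpa using hct)]
    show (base ++ t.items) ++ _ = base ++ (t.items ++ _)
    rw [List.append_assoc]

-- a whole event fold on such a split dict acts inside 't'
lemma pvFoldl_split (ev : List (List String × String))
    (base : List (List String × PySem.Dict String Int))
    (t : PySem.Dict (List String) (PySem.Dict String Int))
    (h : ∀ p ∈ ev.map Prod.fst, ∀ q ∈ base, q.1 ≠ p) :
    ev.foldl pvStep (PySem.Dict.mk (base ++ t.items)) =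
      PySem.Dict.mk (base ++ (ev.foldl pvStep t).items) := by
  induction ev generalizing t with
  | nil => rfl
  | cons e ev ih =>
      rw [List.foldl_cons, List.foldl_cons,
        pvStep_split base t e (h e.1 (by simp)),
        ih (pvStep t e) (fun p hp q hq => h p (by simp [hp]) q hq)]

-- starting from empty, the keys produced by an event fold come from the events
lemma pvFoldl_keys (ev : List (List String × String)) (p : List String)
    (hp : p ∈ (ev.foldl pvStep PySem.Dict.empty).keys) : p ∈ ev.map Prod.fst := by
  have h := PySem.Dict.keys_foldl_modify_key ev Prod.fst
    (PySem.Dict.empty : PySem.Dict String Int)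
    (fun _ e => (fun c => c.modify e.2 0 (· + 1))) PySem.Dict.empty
  beta_reduce at h
  rw [show pvStep = fun d (e : List String × String) => d.modify e.1 PySem.Dict.empty
    (fun c => c.modify e.2 0 (· + 1)) from rfl, h] at hp
  simpa using (PySem.Set.mem_ofList _ _).mp hp

-- keys produced by an event fold from empty are unique
lemma pvFoldl_nodup (ev : List (List String × String)) :
    (ev.foldl pvStep PySem.Dict.empty).keys.Nodup := by
  have h := PySem.Dict.nodup_keys_foldl_modify_key ev Prod.fst
    (PySem.Dict.empty : PySem.Dict String Int)
    (fun _ e => (fun c => c.modify e.2 0 (· + 1))) PySem.Dict.empty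
    PySem.Dict.nodup_keys_empty
  beta_reduce at h
  rw [show pvStep = fun d (e : List String × String) => d.modify e.1 PySem.Dict.empty
    (fun c => c.modify e.2 0 (· + 1)) from rfl]
  exact h

-- ===== A-side characterisation =====

-- A's outer iterations beyond min(n, L) touch an empty position range and do nothing
lemma pvTail_id (inp out : List String) (n : Int)
    (acc : PySem.Dict (List String) (PySem.Dict String Int)) :
    (PySem.List.pyRange (min n (inp.length : Int)) n 1).foldl (fun d i =>
      (PySem.List.pyRange i (inp.length : Int) 1).foldl (fun d j =>
        let pref := PySem.List.slice inp (some (j - i)) (some (j + 1))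
        let suff := (PySem.List.pyGet? out j).getD ""
        d.modify pref PySem.Dict.empty (fun c => c.modify suff 0 (· + 1))) d) acc = acc := by
  rw [PySem.List.foldl_congr_mem _ _ (fun acc _ => acc) acc ?_, PySem.List.foldl_ignore]
  intro d i hi
  have hmem := (PySem.List.mem_pyRange_one).mp hi
  have hLi : (inp.length : Int) ≤ i := by omega
  rw [PySem.List.pyRange_one_eq_nil hLi, List.foldl_nil]

-- A's inner pass at order i is the fold of the order-i events
lemma pvPassA (inp out : List String) (iN : Nat) (hlen : inp.length ≤ out.length)
    (d : PySem.Dict (List String) (PySem.Dict String Int)) :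
    (PySem.List.pyRange (iN : Int) (inp.length : Int) 1).foldl (fun d j =>
      let pref := PySem.List.slice inp (some (j - (iN : Int))) (some (j + 1))
      let suff := (PySem.List.pyGet? out j).getD ""
      d.modify pref PySem.Dict.empty (fun c => c.modify suff 0 (· + 1))) d =
      (pvEv inp out iN inp.length).foldl pvStep d := by
  rw [PySem.List.pyRange_one]
  rw [show ((inp.length : Int) - (iN : Int)).toNat = inp.length - iN by omega]
  rw [List.foldl_map]
  unfold pvEv
  rw [List.range'_eq_map_range, List.map_map, List.foldl_map]
  apply PySem.List.foldl_congr_mem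
  intro acc k hk
  have hk' : k < inp.length - iN := by simpa using hk
  simp only [Function.comp_apply]
  have h1 : (iN : Int) + (k : Int) - (iN : Int) = ((k : Nat) : Int) := by ring
  have h2 : (iN : Int) + (k : Int) + 1 = ((k : Nat) : Int) + ((iN + 1 : Nat) : Int) := by
    push_cast; ring
  have h3 : (iN : Int) + (k : Int) = ((iN + k : Nat) : Int) := by push_cast; ring
  rw [h1, h2, h3, PySem.List.slice_natCast_add, PySem.List.pyGet?_natCast]
  have hik : iN + k < out.length := by omega
  have h4 : iN + k - iN = k := by omega
  simp [pvStep, List.getElem?_eq_getElem hik, List.getD, h4]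

-- A's whole loop from empty, one order after the other: the items concatenate
lemma pvA_items (inp out : List String) (m : Nat) (hm : m ≤ inp.length) :
    ((List.range m).foldl (fun d i => (pvEv inp out i inp.length).foldl pvStep d)
      PySem.Dict.empty).items =
      (List.range m).flatMap (fun i => ((pvEv inp out i inp.length).foldl pvStep
        PySem.Dict.empty).items) := by
  induction m with
  | zero => rfl
  | succ m ih =>
      have hm' : m ≤ inp.length := by omega
      rw [List.range_succ, List.foldl_append, List.foldl_cons, List.foldl_nil,
        List.flatMap_append, ← ih hm']
      set A := (List.range m).foldl (fun d i => (pvEv inp out i inp.length).foldl pvStep d)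
        PySem.Dict.empty with hA
      have hfresh : ∀ p ∈ (pvEv inp out m inp.length).map Prod.fst, ∀ q ∈ A.items, q.1 ≠ p := by
        intro p hp q hq
        have hplen := pvEv_key_length inp out m inp.length le_rfl p hp
        have hqlen : q.1.length ≤ m := by
          have hq' : q.1 ∈ A.items.map Prod.fst := List.mem_map_of_mem hq
          rw [ih hm'] at hq'
          simp only [List.map_flatMap, List.mem_flatMap, List.mem_range] at hq'
          obtain ⟨i, him, hqi⟩ := hq'
          have hk : q.1 ∈ ((pvEv inp out i inp.length).foldl pvStep PySem.Dict.empty).keys := hqi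
          have := pvEv_key_length inp out i inp.length le_rfl q.1 (pvFoldl_keys _ _ hk)
          omega
        intro hqp; rw [hqp] at hqlen; omega
      have hsplit := pvFoldl_split (pvEv inp out m inp.length) A.items PySem.Dict.empty
        (fun p hp q hq => hfresh p hp q hq)
      have hAeq : PySem.Dict.mk (A.items ++ (PySem.Dict.empty :
          PySem.Dict (List String) (PySem.Dict String Int)).items) = A := by
        show PySem.Dict.mk (A.items ++ []) = A
        rw [List.append_nil]
      rw [hAeq] at hsplit
      rw [hsplit]
      simp

-- ===== B-side characterisation =====

-- enumerate over a String list, made explicit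
lemma pvEnum (xs : List String) (s : Int) :
    PySem.List.enumerate xs s =
      (List.range xs.length).map (fun (j : Nat) => ((s + j : Int), xs.getD j "")) := by
  induction xs generalizing s with
  | nil => rfl
  | cons x t ih =>
      show (s, x) :: PySem.List.enumerate t (s + 1) = _
      rw [ih (s + 1), List.length_cons, List.range_succ_eq_map, List.map_cons, List.map_map]
      simp only [Nat.cast_zero, add_zero, List.getD_cons_zero]
      congr 1
      apply List.map_congr_left
      intro j _
      simp only [Function.comp_apply, List.getD_cons_succ]
      congr 1
      push_cast; ring

-- reading a list at a nonnegative in-range Python index is List.getD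
lemma pvPyGetD {α : Type} (l : List α) (c : Nat) (d : α) (h : c < l.length) :
    (PySem.List.pyGet? l ((c : Nat) : Int)).getD d = l.getD c d := by
  rw [PySem.List.pyGet?_natCast, List.getElem?_eq_getElem h]
  simp [List.getD, List.getElem?_eq_getElem h]

-- the length of a bucket list is preserved by an index-update fold
lemma pvLen {α : Type} (l : List Nat) (g : List α → Nat → α) (bs : List α) :
    (l.foldl (fun bs i => bs.set i (g bs i)) bs).length = bs.length := by
  induction l generalizing bs with
  | nil => rfl
  | cons i l ih => rw [List.foldl_cons, ih, List.length_set]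

-- … and by a pass of nested index-update folds
lemma pvLen2 {α : Type} (js : List Nat) (k : Nat → Nat) (g : Nat → Nat → α → α) (d : α)
    (bs : List α) :
    (js.foldl (fun bs j => (List.range (k j)).foldl
      (fun bs i => bs.set i (g j i (bs.getD i d))) bs) bs).length = bs.length := by
  induction js generalizing bs with
  | nil => rfl
  | cons j l ih => rw [List.foldl_cons, ih, pvLen]

-- reading bucket r after an in-range index-update fold over range c
lemma pvSetFold_getD {α : Type} (c : Nat) (g : Nat → α → α) (bs : List α) (d : α)
    (hc : c ≤ bs.length) (r : Nat) :
    ((List.range c).foldl (fun bs i => bs.set i (g i (bs.getD i d))) bs).getD r d =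
      if r < c then g r (bs.getD r d) else bs.getD r d := by
  induction c with
  | zero => simp
  | succ c ih =>
      have hc' : c ≤ bs.length := by omega
      rw [List.range_succ, List.foldl_append, List.foldl_cons, List.foldl_nil]
      have hlen : ((List.range c).foldl (fun bs i => bs.set i (g i (bs.getD i d))) bs).length
          = bs.length := pvLen _ _ _
      have hset : ∀ (l : List α) (i j : Nat) (a : α), i < l.length →
          (l.set i a).getD j d = if i = j then a else l.getD j d := by
        intro l i j a hi
        simp only [List.getD, List.getElem?_set]
        split_ifs <;> simp_all
      rw [hset _ c r _ (by omega)]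
      by_cases hrc : c = r
      · subst hrc
        rw [if_pos rfl, ih hc', if_neg (lt_irrefl c), if_pos (by omega)]
      · rw [if_neg hrc, ih hc']
        by_cases hr : r < c
        · rw [if_pos hr, if_pos (by omega)]
        · rw [if_neg hr, if_neg (by omega)]

-- B's inner loop at position j: each bucket below the cut gets one counting step,
-- with the incrementally built prefix equal to the corresponding window
lemma pvInnerB (inp : List String) (suf : String) (j : Nat) (hj : j < inp.length)
    (c : Nat) (hcj : c ≤ j + 1)
    (bs : List (PySem.Dict (List String) (PySem.Dict String Int))) (hbs : c ≤ bs.length) :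
    ((List.range c).map (fun (i : Nat) => (i : Int))).foldl (fun st i =>
        let pref := ((PySem.List.pyGet? inp ((j : Int) - i)).getD "") :: st.2
        let b := (PySem.List.pyGet? st.1 i).getD PySem.Dict.empty
        let b1 := b.setdefault pref PySem.Dict.empty
        let c' := b1.getD pref PySem.Dict.empty
        (st.1.set i.toNat (b1.insert pref (c'.insert suf (c'.getD suf 0 + 1))), pref))
      (bs, ([] : List String)) =
      ((List.range c).foldl (fun bs i =>
          bs.set i (pvStep (bs.getD i PySem.Dict.empty)
            ((inp.drop (j - i)).take (i + 1), suf))) bs,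
        (inp.drop (j + 1 - c)).take c) := by
  induction c with
  | zero => simp
  | succ c ih =>
      have hcj' : c ≤ j + 1 := by omega
      have hbs' : c ≤ bs.length := by omega
      have hmap : (List.range (c + 1)).map (fun (i : Nat) => (i : Int)) =
          (List.range c).map (fun (i : Nat) => (i : Int)) ++ [(c : Int)] := by
        rw [List.range_succ, List.map_append]
        rfl
      rw [hmap, List.foldl_append, ih hcj' hbs', List.range_succ, List.foldl_append]
      simp only [List.foldl_cons, List.foldl_nil]
      have hlen : ((List.range c).foldl (fun bs i =>
          bs.set i (pvStep (bs.getD i PySem.Dict.empty)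
            ((inp.drop (j - i)).take (i + 1), suf))) bs).length = bs.length := pvLen _ _ _
      have hcj2 : c ≤ j := by omega
      have hcast : (j : Int) - (c : Int) = ((j - c : Nat) : Int) := by push_cast; omega
      have hjc : j - c < inp.length := by omega
      have hpref : ((PySem.List.pyGet? inp ((j : Int) - (c : Int))).getD "") ::
          (inp.drop (j + 1 - c)).take c = (inp.drop (j - c)).take (c + 1) := by
        rw [hcast, PySem.List.pyGet?_natCast, List.getElem?_eq_getElem hjc]
        have hdrop : inp.drop (j - c) = inp[j - c] :: inp.drop (j - c + 1) :=
          (List.getElem_cons_drop hjc).symm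
        rw [hdrop, List.take_succ_cons]
        have h5 : j - c + 1 = j + 1 - c := by omega
        rw [h5]
        rfl
      have hread := pvPyGetD ((List.range c).foldl (fun bs i =>
            bs.set i (pvStep (bs.getD i PySem.Dict.empty)
              ((inp.drop (j - i)).take (i + 1), suf))) bs) c PySem.Dict.empty
          (by rw [hlen]; omega)
      simp only [hpref, hread, Int.toNat_natCast]
      rw [pvStepB_eq]
      have h6 : j + 1 - (c + 1) = j - c := by omega
      rw [h6]

-- B's pass over the positions, with the inner loop in canonical per-bucket form
lemma pvB_outer_eq (inp out : List String) (m : Int) (hm0 : 0 ≤ m) (js : List Nat)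
    (hj : ∀ j ∈ js, j < inp.length)
    (bs : List (PySem.Dict (List String) (PySem.Dict String Int)))
    (hbs : bs.length = m.toNat) :
    js.foldl (fun bs (j : Nat) =>
      ((PySem.List.pyRange 0 (min m ((j : Int) + 1)) 1).foldl (fun st i =>
          let pref := ((PySem.List.pyGet? inp ((j : Int) - i)).getD "") :: st.2
          let b := (PySem.List.pyGet? st.1 i).getD PySem.Dict.empty
          let b1 := b.setdefault pref PySem.Dict.empty
          let c' := b1.getD pref PySem.Dict.empty
          (st.1.set i.toNat (b1.insert pref (c'.insert (out.getD j "")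
            (c'.getD (out.getD j "") 0 + 1))), pref))
        (bs, ([] : List String))).1) bs =
    js.foldl (fun bs (j : Nat) =>
      (List.range (min m.toNat (j + 1))).foldl (fun bs i =>
        bs.set i (pvStep (bs.getD i PySem.Dict.empty)
          ((inp.drop (j - i)).take (i + 1), out.getD j ""))) bs) bs := by
  induction js generalizing bs with
  | nil => rfl
  | cons j l ih =>
      have hjl : j < inp.length := hj j (by simp)
      have hcN : min m.toNat (j + 1) ≤ j + 1 := by omega
      have hcbs : min m.toNat (j + 1) ≤ bs.length := by omega
      have hrange : PySem.List.pyRange 0 (min m ((j : Int) + 1)) 1 =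
          (List.range (min m.toNat (j + 1))).map (fun (i : Nat) => (i : Int)) := by
        rw [PySem.List.pyRange_one]
        rw [show (min m ((j : Int) + 1) - 0).toNat = min m.toNat (j + 1) by omega]
        apply List.map_congr_left
        intro i _
        omega
      rw [List.foldl_cons, List.foldl_cons, hrange,
        pvInnerB inp (out.getD j "") j hjl _ hcN bs hcbs]
      refine ih (fun j' hj' => hj j' (by simp [hj'])) _ ?_
      have hl := pvLen (List.range (min m.toNat (j + 1)))
        (fun bs i => pvStep (bs.getD i PySem.Dict.empty)
          ((inp.drop (j - i)).take (i + 1), out.getD j "")) bs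
      beta_reduce at hl
      rw [hl]
      exact hbs

-- after the whole pass over positions below J, bucket r holds the order-r events below J
lemma pvOuterB (inp out : List String) (m : Nat) (J : Nat)
    (hJ : J ≤ inp.length) (r : Nat) (hr : r < m) :
    (((List.range J).foldl (fun bs j =>
        (List.range (min m (j + 1))).foldl (fun bs i =>
          bs.set i (pvStep (bs.getD i PySem.Dict.empty)
            ((inp.drop (j - i)).take (i + 1), out.getD j ""))) bs)
      (List.replicate m (PySem.Dict.empty :
        PySem.Dict (List String) (PySem.Dict String Int)))).getD r PySem.Dict.empty) =
      (pvEv inp out r J).foldl pvStep PySem.Dict.empty := by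
  induction J with
  | zero =>
      have h0 : pvEv inp out r 0 = [] := by unfold pvEv; simp
      rw [h0]
      simp [List.getD, hr]
  | succ J ih =>
      have hJ' : J ≤ inp.length := by omega
      rw [List.range_succ, List.foldl_append, List.foldl_cons, List.foldl_nil]
      set B := (List.range J).foldl (fun bs j =>
        (List.range (min m (j + 1))).foldl (fun bs i =>
          bs.set i (pvStep (bs.getD i PySem.Dict.empty)
            ((inp.drop (j - i)).take (i + 1), out.getD j ""))) bs)
        (List.replicate m (PySem.Dict.empty :
          PySem.Dict (List String) (PySem.Dict String Int))) with hB
      have hBlen : B.length = m := by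
        have hl := pvLen2 (List.range J) (fun j => min m (j + 1))
          (fun j i b => pvStep b ((inp.drop (j - i)).take (i + 1), out.getD j ""))
          PySem.Dict.empty
          (List.replicate m (PySem.Dict.empty :
            PySem.Dict (List String) (PySem.Dict String Int)))
        beta_reduce at hl
        rw [hB, hl]
        exact List.length_replicate
      have hgd := pvSetFold_getD (min m (J + 1))
        (fun i b => pvStep b ((inp.drop (J - i)).take (i + 1), out.getD J "")) B
        PySem.Dict.empty (by omega) r
      beta_reduce at hgd
      rw [hgd]
      by_cases hrJ : r < min m (J + 1)
      · rw [if_pos hrJ, ih hJ']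
        have hev : pvEv inp out r (J + 1) = pvEv inp out r J ++
            [((inp.drop (J - r)).take (r + 1), out.getD J "")] := by
          unfold pvEv
          rw [show J + 1 - r = (J - r) + 1 by omega, List.range'_1_concat, List.map_append]
          rw [show r + (J - r) = J by omega]
          rfl
        rw [hev, List.foldl_append, List.foldl_cons, List.foldl_nil]
      · rw [if_neg hrJ, ih hJ']
        have hev : pvEv inp out r (J + 1) = pvEv inp out r J := by
          unfold pvEv
          rw [show J + 1 - r = J - r by omega]
        rw [hev]

-- merging the buckets in order concatenates their items
lemma pvMerge (inp out : List String) (m : Nat) (hm : m ≤ inp.length) :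
    (((List.range m).map (fun i => (pvEv inp out i inp.length).foldl pvStep
        PySem.Dict.empty)).foldl
      (fun model (b : PySem.Dict (List String) (PySem.Dict String Int)) =>
        model.update b.items) PySem.Dict.empty).items =
      (List.range m).flatMap (fun i => ((pvEv inp out i inp.length).foldl pvStep
        PySem.Dict.empty).items) := by
  induction m with
  | zero => rfl
  | succ m ih =>
      have hm' : m ≤ inp.length := by omega
      rw [List.range_succ, List.map_append, List.foldl_append, List.flatMap_append,
        ← ih hm']
      simp only [List.map_cons, List.map_nil, List.foldl_cons, List.foldl_nil]
      set Mo := ((List.range m).map (fun i => (pvEv inp out i inp.length).foldl pvStep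
        PySem.Dict.empty)).foldl
        (fun model (b : PySem.Dict (List String) (PySem.Dict String Int)) =>
          model.update b.items) PySem.Dict.empty with hMo
      set bk := (pvEv inp out m inp.length).foldl pvStep PySem.Dict.empty with hbk
      have hfresh : ∀ a ∈ bk.items, Mo.contains a.1 = false := by
        intro a ha
        have halen : a.1.length = m + 1 := by
          have : a.1 ∈ bk.keys := List.mem_map_of_mem ha
          exact pvEv_key_length inp out m inp.length le_rfl a.1 (pvFoldl_keys _ _ this)
        by_contra hcontra
        have hcon : Mo.contains a.1 = true := by
          cases h : Mo.contains a.1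
          · exact absurd h hcontra
          · rfl
        have hmem : a.1 ∈ Mo.keys := (PySem.Dict.contains_iff_mem_keys _ _).mp hcon
        have : a.1 ∈ Mo.items.map Prod.fst := hmem
        rw [ih hm'] at this
        simp only [List.map_flatMap, List.mem_flatMap, List.mem_range] at this
        obtain ⟨i, him, hqi⟩ := this
        have := pvEv_key_length inp out i inp.length le_rfl a.1 (pvFoldl_keys _ _ hqi)
        omega
      have hnodup : (bk.items.map Prod.fst).Nodup := pvFoldl_nodup _
      have hup : (Mo.update bk.items).items = Mo.items ++
          bk.items.map (fun a => (a.1, a.2)) := by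
        exact PySem.Dict.items_foldl_insert_fresh bk.items Prod.fst Prod.snd Mo hfresh hnodup
      rw [hup]
      simp [hbk]

-- ===== VERDICT (by name: the statement is the Claim_ definition above) =====
theorem train_ngram_model_spec : Claim_equal_train_ngram_model := by
  intro inp out n _ hpre
  unfold Spec_train_ngram_model train_ngram_model train_ngram_model_alt
  simp only []
  congr 1
  by_cases hn : 0 < n
  · -- main case
    have hlen : inp.length ≤ out.length := by
      rcases hpre with h | h
      · omega
      · exact h
    set L : Nat := inp.length with hL
    set m : Int := min n (L : Int) with hmdef
    have hm0 : 0 ≤ m := by omega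
    have hmL : m.toNat ≤ L := by omega
    -- A side
    have hAsplit : PySem.List.pyRange 0 n 1 =
        PySem.List.pyRange 0 m 1 ++ PySem.List.pyRange m n 1 :=
      PySem.List.pyRange_one_append 0 m n (by omega) (by omega)
    rw [hAsplit, List.foldl_append, pvTail_id inp out n _]
    have hhead : PySem.List.pyRange 0 m 1 = (List.range m.toNat).map (fun (i : Nat) => (i : Int)) := by
      rw [PySem.List.pyRange_one, show (m - 0).toNat = m.toNat by omega]
      apply List.map_congr_left
      intro i _
      omega
    rw [hhead, List.foldl_map]
    have hApass : (List.range m.toNat).foldl (fun d (iN : Nat) =>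
        (PySem.List.pyRange (iN : Int) (L : Int) 1).foldl (fun d j =>
          let pref := PySem.List.slice inp (some (j - (iN : Int))) (some (j + 1))
          let suff := (PySem.List.pyGet? out j).getD ""
          d.modify pref PySem.Dict.empty (fun c => c.modify suff 0 (· + 1))) d)
        PySem.Dict.empty =
        (List.range m.toNat).foldl (fun d i => (pvEv inp out i L).foldl pvStep d)
          PySem.Dict.empty := by
      apply PySem.List.foldl_congr_mem
      intro acc iN _
      exact pvPassA inp out iN hlen acc
    rw [hApass, pvA_items inp out m.toNat hmL]
    -- B side
    have hmif : (if 0 < n then min n ((inp.length : Nat) : Int) else 0) = m := by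
      rw [if_pos hn]
    rw [hmif]
    have hbuckets0 : (PySem.List.pyRange 0 m 1).map
        (fun _ => (PySem.Dict.empty : PySem.Dict (List String) (PySem.Dict String Int))) =
        List.replicate m.toNat PySem.Dict.empty := by
      rw [hhead, List.map_map]
      rw [show ((fun (_ : Int) => (PySem.Dict.empty :
          PySem.Dict (List String) (PySem.Dict String Int))) ∘ (fun (i : Nat) => (i : Int))) =
        fun _ => (PySem.Dict.empty : PySem.Dict (List String) (PySem.Dict String Int)) from rfl]
      rw [List.map_const']
      simp
    rw [hbuckets0]
    have hslice : PySem.List.slice out none (some ((inp.length : Nat) : Int)) = out.take L :=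
      PySem.List.slice_to_natCast out L
    rw [hslice, pvEnum (out.take L) 0]
    have htklen : (out.take L).length = L := by
      rw [List.length_take]
      omega
    rw [htklen, List.foldl_map]
    have hcongr1 : ∀ (bs : List (PySem.Dict (List String) (PySem.Dict String Int))) (j : Nat),
        j ∈ List.range L →
        ((PySem.List.pyRange 0 (min m ((0 + (j : Int)) + 1)) 1).foldl (fun st i =>
          let pref := ((PySem.List.pyGet? inp ((0 + (j : Int)) - i)).getD "") :: st.2
          let b := (PySem.List.pyGet? st.1 i).getD PySem.Dict.empty
          let b1 := b.setdefault pref PySem.Dict.empty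
          let c' := b1.getD pref PySem.Dict.empty
          (st.1.set i.toNat (b1.insert pref (c'.insert ((out.take L).getD j "")
            (c'.getD ((out.take L).getD j "") 0 + 1))), pref))
          (bs, ([] : List String))).1 =
        ((PySem.List.pyRange 0 (min m ((j : Int) + 1)) 1).foldl (fun st i =>
          let pref := ((PySem.List.pyGet? inp ((j : Int) - i)).getD "") :: st.2
          let b := (PySem.List.pyGet? st.1 i).getD PySem.Dict.empty
          let b1 := b.setdefault pref PySem.Dict.empty
          let c' := b1.getD pref PySem.Dict.empty
          (st.1.set i.toNat (b1.insert pref (c'.insert (out.getD j "")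
            (c'.getD (out.getD j "") 0 + 1))), pref))
          (bs, ([] : List String))).1 := by
      intro bs j hjmem
      have hjL : j < L := List.mem_range.mp hjmem
      have hz : (0 + (j : Int)) = (j : Int) := by ring
      have htk : (out.take L).getD j "" = out.getD j "" := by
        simp only [List.getD]
        rw [List.getElem?_take_of_lt hjL]
      rw [hz, htk]
    rw [PySem.List.foldl_congr_mem' _ _ _ _
      (fun j hj bs => hcongr1 bs j hj)]
    rw [pvB_outer_eq inp out m hm0 (List.range L)
      (fun j hj => List.mem_range.mp hj) _ (by simp)]
    have hfinal : (List.range L).foldl (fun bs j =>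
        (List.range (min m.toNat (j + 1))).foldl (fun bs i =>
          bs.set i (pvStep (bs.getD i PySem.Dict.empty)
            ((inp.drop (j - i)).take (i + 1), out.getD j ""))) bs)
        (List.replicate m.toNat (PySem.Dict.empty :
          PySem.Dict (List String) (PySem.Dict String Int))) =
        (List.range m.toNat).map (fun i => (pvEv inp out i L).foldl pvStep PySem.Dict.empty) := by
      have hlenf := pvLen2 (List.range L) (fun j => min m.toNat (j + 1))
        (fun j i b => pvStep b ((inp.drop (j - i)).take (i + 1), out.getD j ""))
        PySem.Dict.empty (List.replicate m.toNat (PySem.Dict.empty :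
          PySem.Dict (List String) (PySem.Dict String Int)))
      beta_reduce at hlenf
      apply List.ext_getElem
      · rw [hlenf]
        simp
      · intro r h1 h2
        have hrm : r < m.toNat := by
          have := h2
          simpa using this
        have := pvOuterB inp out m.toNat L le_rfl r hrm
        have hgetD : ∀ (l : List (PySem.Dict (List String) (PySem.Dict String Int)))
            (hr : r < l.length), l.getD r PySem.Dict.empty = l[r] := by
          intro l hr
          simp [List.getD, List.getElem?_eq_getElem hr]
        rw [← hgetD _ h1, ← hgetD _ h2]
        rw [this]
        rw [hgetD _ (by simpa using hrm)]
        simp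
    rw [hfinal, pvMerge inp out m.toNat hmL]
  · -- n ≤ 0: both sides build no counts at all
    have hn' : n ≤ 0 := by omega
    rw [PySem.List.pyRange_one_eq_nil hn', List.foldl_nil]
    have hmif : (if 0 < n then min n ((inp.length : Nat) : Int) else 0) = 0 := by
      rw [if_neg hn]
    rw [hmif]
    have hb0 : (PySem.List.pyRange 0 (0 : Int) 1).map
        (fun _ => (PySem.Dict.empty : PySem.Dict (List String) (PySem.Dict String Int))) =
        ([] : List (PySem.Dict (List String) (PySem.Dict String Int))) := by
      rw [PySem.List.pyRange_one_eq_nil le_rfl]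
      rfl
    rw [hb0]
    rw [pvEnum (PySem.List.slice out none (some ((inp.length : Nat) : Int))) 0,
      List.foldl_map]
    have hinner : ∀ (j : Nat), ∀ (bs : List (PySem.Dict (List String)
        (PySem.Dict String Int))),
        ((PySem.List.pyRange 0 (min (0 : Int) ((0 + (j : Int)) + 1)) 1).foldl (fun st i =>
          let pref := ((PySem.List.pyGet? inp ((0 + (j : Int)) - i)).getD "") :: st.2
          let b := (PySem.List.pyGet? st.1 i).getD PySem.Dict.empty
          let b1 := b.setdefault pref PySem.Dict.empty
          let c' := b1.getD pref PySem.Dict.empty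
          (st.1.set i.toNat (b1.insert pref
            (c'.insert ((PySem.List.slice out none
                (some ((inp.length : Nat) : Int))).getD j "")
              (c'.getD ((PySem.List.slice out none
                (some ((inp.length : Nat) : Int))).getD j "") 0 + 1))), pref))
          (bs, ([] : List String))).1 = bs := by
      intro j bs
      have hmin : min (0 : Int) ((0 + (j : Int)) + 1) = 0 := by omega
      rw [hmin, PySem.List.pyRange_one_eq_nil le_rfl, List.foldl_nil]
    rw [PySem.List.foldl_congr_mem' _ _ (fun bs _ => bs) _
      (fun j _ bs => hinner j bs), PySem.List.foldl_ignore]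
    rfl
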